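-- pv_equiv track=rewrite | github.com/ewerton5/Python-Projects | pythonexercicios/comp1exercicios/matriz.py | matrizEspecial
-- ===== SOURCE A (Python) =====
-- def zero(n):
-- 	lista = []
-- 	for cont in range(n):
-- 		lista += [0]
-- 	matriz = []
-- 	for cont in range(n):
-- 		matriz += [lista + []]
-- 	return matriz
--
-- def matrizEspecial(n):
-- 	matriz = zero(n)
-- 	for cont in range(n, -2, -1):
-- 		for linha in range(n):
-- 			for coluna in range(n):
-- 				if linha == cont or coluna == cont:
-- 					matriz[linha][coluna] = cont + 1
--
-- 	return matriz
-- ===== SOURCE B (Python) =====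
-- def matrizEspecial(n):
-- 	# cell (linha, coluna) is min(linha, coluna) + 1, computed directly
-- 	return [[min(linha, coluna) + 1 for coluna in range(n)] for linha in range(n)]
-- ===== Notes on version B (the rewrite author's own statement) =====
-- stated objective: faster
-- what changed: Replaced the O(n^3) repeated-overwrite sweep (for each cont from n down to -1, rewrite every cell on row/column cont) by a direct double comprehension assigning min(row,col)+1 to each cell once.
import Mathlib
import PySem

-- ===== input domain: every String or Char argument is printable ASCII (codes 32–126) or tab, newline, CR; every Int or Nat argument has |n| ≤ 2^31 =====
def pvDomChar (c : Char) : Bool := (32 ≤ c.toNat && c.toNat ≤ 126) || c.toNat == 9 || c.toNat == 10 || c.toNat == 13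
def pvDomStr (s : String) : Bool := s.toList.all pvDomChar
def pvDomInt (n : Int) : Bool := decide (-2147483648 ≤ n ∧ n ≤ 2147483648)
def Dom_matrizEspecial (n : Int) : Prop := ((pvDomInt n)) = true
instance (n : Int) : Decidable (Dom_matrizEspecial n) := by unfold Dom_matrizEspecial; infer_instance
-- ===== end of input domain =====

-- B replaces A's O(n^3) repeated row/column overwrite sweep by one direct double loop
-- assigning min(row, col) + 1 to each cell (objective: faster).

-- ===== PORT A =====
-- helper zero(n): n×n matrix of zeros, built by list appends exactly as in the Python
def pvZero (n : Int) : List (List Int) :=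
  let lista : List Int :=
    (PySem.List.pyRange 0 n 1).foldl (fun l _ => l ++ [(0 : Int)]) []
  (PySem.List.pyRange 0 n 1).foldl (fun m _ => m ++ [lista ++ []]) []

-- matriz[linha][coluna] = v is ported as a row read (pyGetD) plus two pySetD writes;
-- linha and coluna come from range(n), hence are always in range, so this is exact.
def matrizEspecial (n : Int) : List (List Int) :=
  (PySem.List.pyRange n (-2) (-1)).foldl (fun matriz cont =>
    (PySem.List.pyRange 0 n 1).foldl (fun m linha =>
      (PySem.List.pyRange 0 n 1).foldl (fun m2 coluna =>
        if linha = cont ∨ coluna = cont then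
          PySem.List.pySetD m2 linha
            (PySem.List.pySetD (PySem.List.pyGetD m2 linha []) coluna (cont + 1))
        else m2) m) matriz) (pvZero n)

-- ===== PORT B =====
def matrizEspecial_alt (n : Int) : List (List Int) :=
  (PySem.List.pyRange 0 n 1).map (fun linha =>
    (PySem.List.pyRange 0 n 1).map (fun coluna => min linha coluna + 1))

-- ===== PRECONDITION & SPEC =====
def Spec_matrizEspecial (n : Int) (out : List (List Int)) : Prop := out = matrizEspecial_alt n
instance (n : Int) (out : List (List Int)) : Decidable (Spec_matrizEspecial n out) := by unfold Spec_matrizEspecial; infer_instance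

-- ===== CLAIM (what is proved, stated in full; the proofs are below) =====
def Claim_equal_matrizEspecial : Prop := ∀ (n : Int), Dom_matrizEspecial n → Spec_matrizEspecial n (matrizEspecial n)

-- ===== LEMMAS AND PROOFS =====

-- appending one constant per loop iteration is init ++ a constant map of the loop list
theorem pv_foldl_append_const {α γ : Type} (c : α) :
    ∀ (xs : List γ) (init : List α),
      xs.foldl (fun l _ => l ++ [c]) init = init ++ xs.map (fun _ => c) := by
  intro xs
  induction xs with
  | nil => simp
  | cons x xs ih => intro init; simp [List.foldl_cons, ih]

-- zero(n) is the n×n constant-0 matrix in map-over-range form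
theorem pvZero_eq (n : Int) :
    pvZero n = (PySem.List.pyRange 0 n 1).map
      (fun _ => (PySem.List.pyRange 0 n 1).map (fun _ => (0 : Int))) := by
  unfold pvZero
  rw [pv_foldl_append_const, pv_foldl_append_const]
  simp

-- writing position c of a row given as a map over range(n) updates the mapped function at c
theorem pv_set_map_range {α : Type} (G : Int → α) (R : α) (c n : Int)
    (h0 : 0 ≤ c) (_hn : c < n) :
    PySem.List.pySetD ((PySem.List.pyRange 0 n 1).map G) c R
      = (PySem.List.pyRange 0 n 1).map (fun i => if i = c then R else G i) := by
  rw [PySem.List.pySetD_of_nonneg _ _ h0]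
  apply List.ext_getElem
  · simp
  · intro k h1 h2
    simp only [List.getElem_set, List.getElem_map, PySem.List.getElem_pyRange_one]
    have : (c.toNat = k) ↔ ((0 : Int) + (k : Int) = c) := by omega
    by_cases hk : c.toNat = k
    · simp [hk, this.mp hk]
    · simp only [if_neg hk]
      rw [if_neg (by omega)]

-- the innermost coluna-loop, on a matrix in map form, updates row `linha` pointwise
theorem pv_inner (cont linha n : Int) (hl0 : 0 ≤ linha) (hln : linha < n) :
    ∀ (k : Nat) (a : Int) (F : Int → Int → Int), 0 ≤ a → (n - a).toNat = k →
      (PySem.List.pyRange a n 1).foldl (fun m2 coluna =>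
          if linha = cont ∨ coluna = cont then
            PySem.List.pySetD m2 linha
              (PySem.List.pySetD (PySem.List.pyGetD m2 linha []) coluna (cont + 1))
          else m2)
        ((PySem.List.pyRange 0 n 1).map (fun i => (PySem.List.pyRange 0 n 1).map (F i)))
      = (PySem.List.pyRange 0 n 1).map (fun i => (PySem.List.pyRange 0 n 1).map
          (fun j => if i = linha ∧ (linha = cont ∨ j = cont) ∧ a ≤ j then cont + 1 else F i j)) := by
  intro k
  induction k with
  | zero =>
    intro a F ha hk
    rw [PySem.List.pyRange_one_eq_nil (a := a) (b := n) (by omega)]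
    simp only [List.foldl_nil]
    apply List.map_congr_left
    intro i hi
    apply List.map_congr_left
    intro j hj
    rw [PySem.List.mem_pyRange_one] at hj
    rw [if_neg (by omega)]
  | succ k ih =>
    intro a F ha hk
    rw [PySem.List.pyRange_one_cons (a := a) (b := n) (by omega)]
    simp only [List.foldl_cons]
    by_cases hc : linha = cont ∨ a = cont
    · rw [if_pos hc]
      rw [PySem.List.pyGetD_map_pyRange_of_nonneg _ _ _ _ hl0 hln]
      rw [pv_set_map_range _ _ _ _ ha (by omega)]
      rw [pv_set_map_range _ _ _ _ hl0 hln]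
      have hmat :
          (PySem.List.pyRange 0 n 1).map (fun i =>
            if i = linha then (PySem.List.pyRange 0 n 1).map (fun j => if j = a then cont + 1 else F linha j)
            else (PySem.List.pyRange 0 n 1).map (F i))
          = (PySem.List.pyRange 0 n 1).map (fun i => (PySem.List.pyRange 0 n 1).map
              (fun j => if i = linha ∧ j = a then cont + 1 else F i j)) := by
        apply List.map_congr_left
        intro i hi
        by_cases hil : i = linha
        · subst hil
          rw [if_pos rfl]
          apply List.map_congr_left
          intro j hj
          by_cases hja : j = a <;> simp [hja]
        · simp only [if_neg hil]
          apply List.map_congr_left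
          intro j hj
          rw [if_neg (by tauto)]
      rw [hmat, ih (a + 1) _ (by omega) (by omega)]
      apply List.map_congr_left
      intro i hi
      apply List.map_congr_left
      intro j hj
      rw [PySem.List.mem_pyRange_one] at hi hj
      by_cases h1 : i = linha ∧ (linha = cont ∨ j = cont) ∧ a + 1 ≤ j
      · rw [if_pos h1, if_pos (by omega)]
      · rw [if_neg h1]
        by_cases h2 : i = linha ∧ j = a
        · rw [if_pos h2, if_pos (by omega)]
        · rw [if_neg h2, if_neg (by omega)]
    · rw [if_neg hc]
      rw [ih (a + 1) F (by omega) (by omega)]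
      apply List.map_congr_left
      intro i hi
      apply List.map_congr_left
      intro j hj
      rw [PySem.List.mem_pyRange_one] at hi hj
      by_cases h1 : i = linha ∧ (linha = cont ∨ j = cont) ∧ a + 1 ≤ j
      · rw [if_pos h1, if_pos (by omega)]
      · rw [if_neg h1, if_neg (by omega)]

-- the linha-loop for one fixed cont, on a matrix in map form
theorem pv_mid (cont n : Int) :
    ∀ (k : Nat) (a : Int) (F : Int → Int → Int), 0 ≤ a → (n - a).toNat = k →
      (PySem.List.pyRange a n 1).foldl (fun m linha =>
          (PySem.List.pyRange 0 n 1).foldl (fun m2 coluna =>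
            if linha = cont ∨ coluna = cont then
              PySem.List.pySetD m2 linha
                (PySem.List.pySetD (PySem.List.pyGetD m2 linha []) coluna (cont + 1))
            else m2) m)
        ((PySem.List.pyRange 0 n 1).map (fun i => (PySem.List.pyRange 0 n 1).map (F i)))
      = (PySem.List.pyRange 0 n 1).map (fun i => (PySem.List.pyRange 0 n 1).map
          (fun j => if (i = cont ∨ j = cont) ∧ a ≤ i then cont + 1 else F i j)) := by
  intro k
  induction k with
  | zero =>
    intro a F ha hk
    rw [PySem.List.pyRange_one_eq_nil (a := a) (b := n) (by omega)]
    simp only [List.foldl_nil]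
    apply List.map_congr_left
    intro i hi
    rw [PySem.List.mem_pyRange_one] at hi
    apply List.map_congr_left
    intro j hj
    rw [if_neg (by omega)]
  | succ k ih =>
    intro a F ha hk
    rw [PySem.List.pyRange_one_cons (a := a) (b := n) (by omega)]
    simp only [List.foldl_cons]
    rw [pv_inner cont a n ha (by omega) (n - 0).toNat 0 F (by omega) rfl]
    rw [ih (a + 1) _ (by omega) (by omega)]
    apply List.map_congr_left
    intro i hi
    apply List.map_congr_left
    intro j hj
    rw [PySem.List.mem_pyRange_one] at hi hj
    by_cases h1 : (i = cont ∨ j = cont) ∧ a + 1 ≤ i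
    · rw [if_pos h1, if_pos (by omega)]
    · rw [if_neg h1]
      by_cases h2 : i = a ∧ (a = cont ∨ j = cont) ∧ 0 ≤ j
      · rw [if_pos h2, if_pos (by omega)]
      · rw [if_neg h2, if_neg (by omega)]

-- the countdown cont-loop: after processing cont = c, c-1, …, -1 every cell (i, j)
-- with min i j ≤ c holds min i j + 1
theorem pv_outer (n : Int) :
    ∀ (k : Nat) (c : Int) (F : Int → Int → Int), (c + 2).toNat = k →
      (PySem.List.pyRange c (-2) (-1)).foldl (fun matriz cont =>
          (PySem.List.pyRange 0 n 1).foldl (fun m linha =>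
            (PySem.List.pyRange 0 n 1).foldl (fun m2 coluna =>
              if linha = cont ∨ coluna = cont then
                PySem.List.pySetD m2 linha
                  (PySem.List.pySetD (PySem.List.pyGetD m2 linha []) coluna (cont + 1))
              else m2) m) matriz)
        ((PySem.List.pyRange 0 n 1).map (fun i => (PySem.List.pyRange 0 n 1).map (F i)))
      = (PySem.List.pyRange 0 n 1).map (fun i => (PySem.List.pyRange 0 n 1).map
          (fun j => if min i j ≤ c then min i j + 1 else F i j)) := by
  intro k
  induction k with
  | zero =>
    intro c F hk
    rw [PySem.List.pyRange_neg_one_eq_nil (by omega)]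
    simp only [List.foldl_nil]
    apply List.map_congr_left
    intro i hi
    rw [PySem.List.mem_pyRange_one] at hi
    apply List.map_congr_left
    intro j hj
    rw [PySem.List.mem_pyRange_one] at hj
    rw [if_neg (by omega)]
  | succ k ih =>
    intro c F hk
    rw [PySem.List.pyRange_neg_one_cons (by omega)]
    simp only [List.foldl_cons]
    rw [pv_mid c n (n - 0).toNat 0 F (by omega) rfl]
    rw [ih (c - 1) _ (by omega)]
    apply List.map_congr_left
    intro i hi
    rw [PySem.List.mem_pyRange_one] at hi
    apply List.map_congr_left
    intro j hj
    rw [PySem.List.mem_pyRange_one] at hj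
    by_cases h1 : min i j ≤ c - 1
    · rw [if_pos h1, if_pos (by omega)]
    · rw [if_neg h1]
      by_cases h2 : (i = c ∨ j = c) ∧ 0 ≤ i
      · rw [if_pos h2, if_pos (by omega)]
        omega
      · rw [if_neg h2, if_neg (by omega)]

-- ===== VERDICT (by name: the statement is the Claim_ definition above) =====
theorem matrizEspecial_spec : Claim_equal_matrizEspecial := by
  intro n _
  unfold Spec_matrizEspecial matrizEspecial matrizEspecial_alt
  rw [pvZero_eq, pv_outer n (n + 2).toNat n _ rfl]
  apply List.map_congr_left
  intro i hi
  rw [PySem.List.mem_pyRange_one] at hi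
  apply List.map_congr_left
  intro j hj
  rw [PySem.List.mem_pyRange_one] at hj
  rw [if_pos (by omega)]
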